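-- pv_equiv track=rewrite | github.com/zwang1995/solvent-VAE-NLP | script/zw_smiles_split.py | inverse_modify_smiles
-- ===== SOURCE A (Python) =====
-- inverse_list = ["[C6H6]", "[Bran_C6H6]"]
--
-- def inverse_modify_smiles(modify_smile):
--     modify_smile = [modify_smile]
--     start = 99
--     for token in inverse_list:
--         new_modify_smile = []
--         for modify_smi in modify_smile:
--             strings = modify_smi.split(token)
--             strings_len = len(strings)
--             new_strings = []
--             for (i, string) in enumerate(strings):
--                 new_strings.append(string)
--                 if i < strings_len-1:
--                     ben = "c%" + str(start) + "ccccc%" + str(start)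
--                     if token == "[Bran_C6H6]":
--                         ben = "(" + ben + ")"
--                     new_strings.append(ben)
--                     start -= 1
--             new_modify_smile += new_strings
--         modify_smile = new_modify_smile
--         while "" in modify_smile:
--             modify_smile.remove("")
--     inverse_smiles = "".join(modify_smile)
--     # inverse_smiles = Chem.CanonSmiles(inverse_smiles)
--     return inverse_smiles
-- ===== SOURCE B (Python) =====
-- def inverse_modify_smiles(modify_smile):
--     # one left-to-right pass; ring counters: c1 for [C6H6], c2 starts at 99 - #[C6H6]
--     out = []
--     s = modify_smile
--     c1 = 99
--     c2 = 99 - modify_smile.count("[C6H6]")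
--     while True:
--         p1 = s.find("[C6H6]")
--         p2 = s.find("[Bran_C6H6]")
--         if p1 == -1 and p2 == -1:
--             out.append(s)
--             break
--         if p2 == -1 or (p1 != -1 and p1 < p2):
--             out.append(s[:p1])
--             out.append("c%" + str(c1) + "ccccc%" + str(c1))
--             c1 -= 1
--             s = s[p1 + 6:]
--         else:
--             out.append(s[:p2])
--             out.append("(c%" + str(c2) + "ccccc%" + str(c2) + ")")
--             c2 -= 1
--             s = s[p2 + 11:]
--     return "".join(out)
-- ===== Notes on version B (the rewrite author's own statement) =====
-- stated objective: simpler
-- what changed: A splits the string on each token in two full passes, interleaving replacement pieces into intermediate lists, scrubbing empty strings and re-joining; B counts the [C6H6] occurrences once and then does a single left-to-right scan with two ring counters (c1=99, c2=99-n1), emitting replacements in place.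
import Mathlib
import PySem

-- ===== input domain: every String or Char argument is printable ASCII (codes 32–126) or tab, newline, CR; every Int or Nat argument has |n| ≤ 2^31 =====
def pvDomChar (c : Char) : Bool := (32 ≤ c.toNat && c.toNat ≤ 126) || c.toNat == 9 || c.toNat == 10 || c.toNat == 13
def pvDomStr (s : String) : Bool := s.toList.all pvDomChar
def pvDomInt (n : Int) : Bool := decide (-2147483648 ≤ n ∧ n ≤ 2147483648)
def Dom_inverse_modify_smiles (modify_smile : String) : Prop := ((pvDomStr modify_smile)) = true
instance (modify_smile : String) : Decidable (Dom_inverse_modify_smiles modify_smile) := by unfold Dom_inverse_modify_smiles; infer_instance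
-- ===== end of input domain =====

-- B replaces A's two-pass split/interleave/re-join with a single left-to-right scan using two
-- ring counters (objective: simpler — one pass, no intermediate piece lists).

-- ===== PORT A =====
-- inverse_list = ["[C6H6]", "[Bran_C6H6]"]
def pvTok1 : List Char := ['[', 'C', '6', 'H', '6', ']']
def pvTok2 : List Char := ['[', 'B', 'r', 'a', 'n', '_', 'C', '6', 'H', '6', ']']

-- ben = "c%" + str(start) + "ccccc%" + str(start); wrapped in parens for the Bran token
def pvBen (token : List Char) (start : Int) : List Char :=
  let ben := 'c' :: '%' :: PySem.Int.toChars start ++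
             ('c' :: 'c' :: 'c' :: 'c' :: 'c' :: '%' :: PySem.Int.toChars start)
  if token == pvTok2 then '(' :: ben ++ [')'] else ben

-- while "" in modify_smile: modify_smile.remove("")
def pvRemoveBlanks (l : List (List Char)) : List (List Char) :=
  if h : [] ∈ l then pvRemoveBlanks (l.erase []) else l
termination_by l.count []
decreasing_by
  have h1 : l.count ([] : List Char) ≠ 0 := by
    simpa using (List.count_pos_iff.mpr h).ne'
  have h2 := List.count_erase_self (a := ([] : List Char)) (l := l)
  omega

def inverse_modify_smiles (modify_smile : String) : String :=
  let step : (List (List Char) × Int) → List Char → (List (List Char) × Int) := fun st token =>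
    let folded := st.1.foldl (fun (acc : List (List Char) × Int) modify_smi =>
      let strings := PySem.Chars.splitOn modify_smi token
      let strings_len : Int := strings.length
      let inner := (PySem.List.enumerate strings).foldl (fun (a : List (List Char) × Int) p =>
        let a1 : List (List Char) × Int := (a.1 ++ [p.2], a.2)
        if p.1 < strings_len - 1 then (a1.1 ++ [pvBen token a1.2], a1.2 - 1) else a1)
        ([], acc.2)
      (acc.1 ++ inner.1, inner.2))
      ([], st.2)
    (pvRemoveBlanks folded.1, folded.2)
  let final := [pvTok1, pvTok2].foldl step ([modify_smile.toList], 99)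
  String.ofList (PySem.Chars.join [] final.1)

-- ===== PORT B =====
-- "c%" + str(c) + "ccccc%" + str(c)
def pvRing (c : Int) : List Char :=
  'c' :: '%' :: PySem.Int.toChars c ++
  ('c' :: 'c' :: 'c' :: 'c' :: 'c' :: '%' :: PySem.Int.toChars c)

-- the while loop of B: one scan over the remaining suffix, two counters
def pvGo (s : List Char) (c1 c2 : Int) : List Char :=
  let p1 := PySem.Chars.find s pvTok1
  let p2 := PySem.Chars.find s pvTok2
  if p1 = -1 ∧ p2 = -1 then s
  else if p2 = -1 ∨ (¬ p1 = -1 ∧ p1 < p2) then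
    s.take p1.toNat ++ pvRing c1 ++ pvGo (s.drop (p1.toNat + 6)) (c1 - 1) c2
  else
    s.take p2.toNat ++ ('(' :: pvRing c2 ++ [')']) ++ pvGo (s.drop (p2.toNat + 11)) c1 (c2 - 1)
termination_by s.length
decreasing_by
  · have hne : ¬ PySem.Chars.find s pvTok1 = -1 := by tauto
    have h0 : 0 ≤ PySem.Chars.find s pvTok1 := by
      have := PySem.Chars.neg_one_le_find s pvTok1; omega
    have hpre := (PySem.Chars.find_spec h0).1
    have hlen := hpre.length_le
    simp [List.length_drop, pvTok1] at hlen ⊢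
    omega
  · have h2 : ¬ PySem.Chars.find s pvTok2 = -1 := by tauto
    have h0 : 0 ≤ PySem.Chars.find s pvTok2 := by
      have := PySem.Chars.neg_one_le_find s pvTok2; omega
    have hpre := (PySem.Chars.find_spec h0).1
    have hlen := hpre.length_le
    simp [List.length_drop, pvTok2] at hlen ⊢
    omega

def inverse_modify_smiles_alt (modify_smile : String) : String :=
  let s := modify_smile.toList
  String.ofList (pvGo s 99 (99 - (PySem.Chars.count s pvTok1 : Int)))

-- ===== PRECONDITION & SPEC =====
def Spec_inverse_modify_smiles (modify_smile : String) (out : String) : Prop := out = inverse_modify_smiles_alt modify_smile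
instance (modify_smile : String) (out : String) : Decidable (Spec_inverse_modify_smiles modify_smile out) := by unfold Spec_inverse_modify_smiles; infer_instance

-- ===== CLAIM (what is proved, stated in full; the proofs are below) =====
def Claim_equal_inverse_modify_smiles : Prop := ∀ (modify_smile : String), Dom_inverse_modify_smiles modify_smile → Spec_inverse_modify_smiles modify_smile (inverse_modify_smiles modify_smile)

-- ===== LEMMAS AND PROOFS =====

-- ---- generic find facts ----

-- find points at m when there is an occurrence at m and none before
theorem pvFind_eq_of (s sub : List Char) (m : Nat) (hm : sub <+: s.drop m)
    (hnone : ∀ i < m, ¬ sub <+: s.drop i) : PySem.Chars.find s sub = m := by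
  
  have hinf : sub <:+: s := hm.isInfix.trans (List.drop_suffix m s).isInfix
  have h0 : 0 ≤ PySem.Chars.find s sub := (PySem.Chars.find_nonneg_iff s sub).mpr hinf
  obtain ⟨hocc, hmin⟩ := PySem.Chars.find_spec h0
  rcases Nat.lt_trichotomy (PySem.Chars.find s sub).toNat m with h | h | h
  · exact absurd hocc (hnone _ h)
  · omega
  · exact absurd hm (hmin m h)

theorem pvNo_occ_of_find_eq_neg_one (s sub : List Char) (h : PySem.Chars.find s sub = -1)
    (i : Nat) : ¬ sub <+: s.drop i := by
  
  intro hp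
  exact (PySem.Chars.find_eq_neg_one_iff s sub).mp h
    (hp.isInfix.trans (List.drop_suffix i s).isInfix)

theorem pvInfix_iff_occ' (sub x : List Char) : sub <:+: x ↔ ∃ j, sub <+: x.drop j := by
  rw [← PySem.Chars.isIn_iff_infix, ← PySem.Chars.exists_prefix_drop_iff_isIn]

-- find with a skipped prefix known to contain no occurrence
theorem pvFind_shift (s sub : List Char) (k : Nat) (hk : k ≤ s.length)
    (hnone : ∀ i < k, ¬ sub <+: s.drop i) :
    PySem.Chars.find s sub =
      if PySem.Chars.find (s.drop k) sub = -1 then -1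
      else k + PySem.Chars.find (s.drop k) sub := by
  
  by_cases h : PySem.Chars.find (s.drop k) sub = -1
  · rw [if_pos h, PySem.Chars.find_eq_neg_one_iff]
    intro hinf
    obtain ⟨j, hj⟩ := (pvInfix_iff_occ' sub s).mp hinf
    rcases Nat.lt_or_ge j k with hjk | hjk
    · exact hnone j hjk hj
    · refine pvNo_occ_of_find_eq_neg_one _ _ h (j - k) ?_
      rwa [List.drop_drop, Nat.add_sub_cancel' hjk]
  · have h0 : 0 ≤ PySem.Chars.find (s.drop k) sub := by
      have := PySem.Chars.neg_one_le_find (s.drop k) sub; omega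
    obtain ⟨hocc, hmin⟩ := PySem.Chars.find_spec h0
    set q := (PySem.Chars.find (s.drop k) sub).toNat with hq
    rw [List.drop_drop] at hocc
    have : PySem.Chars.find s sub = (k + q : Nat) := by
      refine pvFind_eq_of s sub (k + q) hocc ?_
      intro i hi hpi
      rcases Nat.lt_or_ge i k with hik | hik
      · exact hnone i hik hpi
      · refine hmin (i - k) (by omega) ?_
        rwa [List.drop_drop, Nat.add_sub_cancel' hik]
    rw [this, if_neg h]
    omega

-- ---- splitOn / count characterisation via a fueled reference ----

def pvChunks (sep : List Char) : Nat → List Char → List (List Char)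
  | 0, l => [l]
  | fuel+1, l =>
    let p := PySem.Chars.find l sep
    if p = -1 then [l] else l.take p.toNat :: pvChunks sep fuel (l.drop (p.toNat + sep.length))

theorem pvFind_nil (sep : List Char) (hsep : sep ≠ []) : PySem.Chars.find [] sep = -1 := by
  rw [PySem.Chars.find_eq_neg_one_iff]
  simp [List.infix_nil, hsep]

theorem pvChunks_of_neg (sep l : List Char) (h : PySem.Chars.find l sep = -1) :
    ∀ f, pvChunks sep f l = [l] := by
  intro f
  cases f with
  | zero => rfl
  | succ f => simp [pvChunks, h]

theorem pvFind_occ_len (l sep : List Char) (h : 0 ≤ PySem.Chars.find l sep) :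
    (PySem.Chars.find l sep).toNat + sep.length ≤ l.length := by
  have hocc := (PySem.Chars.find_spec h).1
  have := hocc.length_le
  simp [List.length_drop] at this
  have hle := PySem.Chars.find_le_length l sep
  omega

theorem pvChunks_ne_nil (sep : List Char) (f : Nat) (l : List Char) : pvChunks sep f l ≠ [] := by
  
  cases f with
  | zero => simp [pvChunks]
  | succ f =>
    simp only [pvChunks]
    split <;> simp

theorem pvChunks_irrel (sep : List Char) (hsep : sep ≠ []) :
    ∀ f g l, l.length ≤ f → l.length ≤ g → pvChunks sep f l = pvChunks sep g l := by
  
  intro f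
  induction f with
  | zero =>
    intro g l h1 h2
    have hl : l = [] := by
      cases l <;> simp_all
    subst hl
    cases g with
    | zero => rfl
    | succ g => simp [pvChunks, pvFind_nil sep hsep]
  | succ f ih =>
    intro g l h1 h2
    cases l with
    | nil =>
      cases g with
      | zero => simp [pvChunks, pvFind_nil sep hsep]
      | succ g => simp [pvChunks, pvFind_nil sep hsep]
    | cons c rest =>
      cases g with
      | zero => simp at h2
      | succ g =>
        simp only [pvChunks]
        by_cases h : PySem.Chars.find (c :: rest) sep = -1
        · simp [h]
        · have h0 : 0 ≤ PySem.Chars.find (c :: rest) sep := by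
            have := PySem.Chars.neg_one_le_find (c :: rest) sep; omega
          have hlen := pvFind_occ_len (c :: rest) sep h0
          have hsl : 1 ≤ sep.length := by
            cases sep <;> simp_all
          rw [if_neg h, if_neg h]
          congr 1
          refine ih g _ ?_ ?_ <;> simp [List.length_drop] at * <;> omega

theorem pvSplitOn_go_eq (sep : List Char) (hsep : sep ≠ []) :
    ∀ fuel l cur acc, l.length < fuel →
      PySem.Chars.splitOn.go sep fuel l cur acc =
        acc.reverse ++ List.modifyHead (cur.reverse ++ ·) (pvChunks sep fuel l) := by
  
  intro fuel
  induction fuel with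
  | zero => intro l cur acc h; omega
  | succ f ih =>
    intro l cur acc h
    cases l with
    | nil =>
      rw [PySem.Chars.splitOn.go]
      · simp [pvChunks, pvFind_nil sep hsep]
      · omega
    | cons c rest =>
      rw [PySem.Chars.splitOn.go]
      have hsl : 1 ≤ sep.length := by cases sep <;> simp_all
      by_cases hpre : sep.isPrefixOf (c :: rest)
      · rw [if_pos hpre]
        have hfind : PySem.Chars.find (c :: rest) sep = ((0 : Nat) : Int) := by
          refine pvFind_eq_of _ _ 0 ?_ ?_
          · simpa using List.isPrefixOf_iff_prefix.mp hpre
          · omega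
        have hlen : (List.drop sep.length (c :: rest)).length < f := by
          simp [List.length_drop] at *
          omega
        rw [ih _ _ _ hlen]
        obtain ⟨y, ys, hys⟩ := List.exists_cons_of_ne_nil
          (pvChunks_ne_nil sep f (List.drop sep.length (c :: rest)))
        simp only [pvChunks, hfind]
        norm_num
        simp [hys]
      · rw [if_neg hpre]
        have hnp : ¬ sep <+: (c :: rest) := fun hp => hpre (List.isPrefixOf_iff_prefix.mpr hp)
        have hshift := pvFind_shift (c :: rest) sep 1 (by simp) (by
          intro i hi
          interval_cases i
          simpa using hnp)
        simp only [List.drop_one, List.tail_cons] at hshift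
        have hrl : rest.length < f := by simp at h; omega
        rw [ih _ _ _ hrl]
        by_cases hr : PySem.Chars.find rest sep = -1
        · rw [pvChunks_of_neg sep rest hr, pvChunks_of_neg sep (c :: rest) (by rw [hshift, if_pos hr])]
          simp
        · have h0 : 0 ≤ PySem.Chars.find rest sep := by
            have := PySem.Chars.neg_one_le_find rest sep; omega
          have hfl : PySem.Chars.find (c :: rest) sep = 1 + PySem.Chars.find rest sep := by
            rw [hshift, if_neg hr]; norm_num
          have hrest_ne : rest ≠ [] := by
            intro hc; rw [hc, pvFind_nil sep hsep] at hr; exact hr rfl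
          cases f with
          | zero => omega
          | succ f' =>
            have hocclen := pvFind_occ_len rest sep h0
            set q := (PySem.Chars.find rest sep).toNat with hq
            have hql : (PySem.Chars.find (c :: rest) sep).toNat = q + 1 := by omega
            simp only [pvChunks]
            rw [if_neg (by omega : ¬ PySem.Chars.find (c :: rest) sep = -1), if_neg hr]
            rw [hql]
            have htake : List.take (q + 1) (c :: rest) = c :: List.take q rest := by simp
            have hdrop : List.drop (q + 1 + sep.length) (c :: rest) = List.drop (q + sep.length) rest := by
              simp [List.drop_succ_cons, Nat.add_right_comm]
            rw [htake, hdrop]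
            have hirr : pvChunks sep f' (List.drop (q + sep.length) rest)
                = pvChunks sep (f' + 1) (List.drop (q + sep.length) rest) := by
              refine pvChunks_irrel sep hsep _ _ _ ?_ ?_ <;> simp [List.length_drop] <;> omega
            rw [hirr]
            simp [pvChunks, List.drop_drop, ← hq]

theorem pvSplitOn_eq_chunks (l sep : List Char) (hsep : sep ≠ []) :
    PySem.Chars.splitOn l sep = pvChunks sep (l.length + 1) l := by
  
  show PySem.Chars.splitOn.go sep (l.length + 1) l [] [] = _
  rw [pvSplitOn_go_eq sep hsep (l.length + 1) l [] [] (by omega)]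
  obtain ⟨y, ys, hys⟩ := List.exists_cons_of_ne_nil (pvChunks_ne_nil sep (l.length + 1) l)
  simp [hys]

theorem pvSplitOn_of_neg (l sep : List Char) (hsep : sep ≠ [])
    (h : PySem.Chars.find l sep = -1) : PySem.Chars.splitOn l sep = [l] := by
  
  rw [pvSplitOn_eq_chunks l sep hsep, pvChunks_of_neg sep l h]

theorem pvSplitOn_of_nonneg (l sep : List Char) (hsep : sep ≠ [])
    (h : 0 ≤ PySem.Chars.find l sep) :
    PySem.Chars.splitOn l sep =
      l.take (PySem.Chars.find l sep).toNat ::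
        PySem.Chars.splitOn (l.drop ((PySem.Chars.find l sep).toNat + sep.length)) sep := by
  
  have hne : ¬ PySem.Chars.find l sep = -1 := by omega
  have hocclen := pvFind_occ_len l sep h
  have hsl : 1 ≤ sep.length := by cases sep <;> simp_all
  rw [pvSplitOn_eq_chunks l sep hsep]
  conv_lhs => rw [show l.length + 1 = l.length + 1 from rfl]
  simp only [pvChunks, if_neg hne]
  congr 1
  rw [pvSplitOn_eq_chunks _ sep hsep]
  refine pvChunks_irrel sep hsep _ _ _ ?_ ?_ <;> simp [List.length_drop] <;> omega

theorem pvSplitOn_ne_nil (l sep : List Char) (hsep : sep ≠ []) :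
    PySem.Chars.splitOn l sep ≠ [] := by
  
  rw [pvSplitOn_eq_chunks l sep hsep]
  exact pvChunks_ne_nil sep _ l

theorem pvCount_go_eq (sep : List Char) (hsep : sep ≠ []) :
    ∀ fuel l acc, l.length ≤ fuel →
      PySem.Chars.count.go sep fuel l acc = acc + ((pvChunks sep fuel l).length - 1) := by
  
  intro fuel
  induction fuel with
  | zero =>
    intro l acc h
    have hl : l = [] := by cases l <;> simp_all
    subst hl
    rw [PySem.Chars.count.go]
    simp [pvChunks]
  | succ f ih =>
    intro l acc h
    cases l with
    | nil =>
      rw [PySem.Chars.count.go]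
      · simp [pvChunks, pvFind_nil sep hsep]
      · omega
    | cons c rest =>
      rw [PySem.Chars.count.go]
      have hsl : 1 ≤ sep.length := by cases sep <;> simp_all
      by_cases hpre : sep.isPrefixOf (c :: rest)
      · rw [if_pos hpre]
        have hfind : PySem.Chars.find (c :: rest) sep = ((0 : Nat) : Int) := by
          refine pvFind_eq_of _ _ 0 ?_ ?_
          · simpa using List.isPrefixOf_iff_prefix.mp hpre
          · omega
        have hlen : (List.drop sep.length (c :: rest)).length ≤ f := by
          simp [List.length_drop] at *; omega
        rw [ih _ _ hlen]
        have hpos := List.length_pos_of_ne_nil (pvChunks_ne_nil sep f (List.drop sep.length (c :: rest)))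
        simp only [pvChunks, hfind]
        norm_num
        omega
      · rw [if_neg hpre]
        have hnp : ¬ sep <+: (c :: rest) := fun hp => hpre (List.isPrefixOf_iff_prefix.mpr hp)
        have hshift := pvFind_shift (c :: rest) sep 1 (by simp) (by
          intro i hi
          interval_cases i
          simpa using hnp)
        simp only [List.drop_one, List.tail_cons] at hshift
        have hrl : rest.length ≤ f := by simp at h; omega
        rw [ih _ _ hrl]
        by_cases hr : PySem.Chars.find rest sep = -1
        · rw [pvChunks_of_neg sep rest hr, pvChunks_of_neg sep (c :: rest) (by rw [hshift, if_pos hr])]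
          simp
        · have h0 : 0 ≤ PySem.Chars.find rest sep := by
            have := PySem.Chars.neg_one_le_find rest sep; omega
          have hrest_ne : rest ≠ [] := by
            intro hc; rw [hc, pvFind_nil sep hsep] at hr; exact hr rfl
          have hfpos : 1 ≤ f := by
            cases rest with
            | nil => exact absurd rfl hrest_ne
            | cons a b => simp at hrl; omega
          obtain ⟨f', rfl⟩ : ∃ f', f = f' + 1 := ⟨f - 1, by omega⟩
          have hocclen := pvFind_occ_len rest sep h0
          set q := (PySem.Chars.find rest sep).toNat with hq
          have hfl : PySem.Chars.find (c :: rest) sep = 1 + PySem.Chars.find rest sep := by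
            rw [hshift, if_neg hr]; norm_num
          have hql : (PySem.Chars.find (c :: rest) sep).toNat = q + 1 := by omega
          simp only [pvChunks]
          rw [if_neg (by omega : ¬ PySem.Chars.find (c :: rest) sep = -1), if_neg hr]
          rw [hql]
          have hdrop : List.drop (q + 1 + sep.length) (c :: rest) = List.drop (q + sep.length) rest := by
            simp [List.drop_succ_cons, Nat.add_right_comm]
          rw [hdrop]
          have hirr : pvChunks sep f' (List.drop (q + sep.length) rest)
              = pvChunks sep (f' + 1) (List.drop (q + sep.length) rest) := by
            refine pvChunks_irrel sep hsep _ _ _ ?_ ?_ <;> simp [List.length_drop] <;> omega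
          rw [hirr]
          simp [pvChunks, List.drop_drop, ← hq]

theorem pvCount_eq (l sep : List Char) (hsep : sep ≠ []) :
    PySem.Chars.count l sep + 1 = (PySem.Chars.splitOn l sep).length := by
  
  have hemp : sep.isEmpty = false := by cases sep <;> simp_all
  show (if sep.isEmpty = true then l.length + 1 else PySem.Chars.count.go sep l.length l 0) + 1 = _
  rw [hemp]
  simp only [Bool.false_eq_true, if_false]
  rw [pvCount_go_eq sep hsep l.length l 0 le_rfl, pvSplitOn_eq_chunks l sep hsep]
  have h1 := List.length_pos_of_ne_nil (pvChunks_ne_nil sep l.length l)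
  have h2 : pvChunks sep l.length l = pvChunks sep (l.length + 1) l :=
    pvChunks_irrel sep hsep _ _ _ le_rfl (by omega)
  rw [h2] at h1 ⊢
  omega

-- ---- token combinatorics ----

theorem pvNoBracket_toChars (c : Int) : '[' ∉ PySem.Int.toChars c := by
  intro h
  have hd : ∀ n : Nat, '[' ∈ Nat.toDigits 10 n → False := by
    intro n hn
    have := Nat.isDigit_of_mem_toDigits (by norm_num) (by norm_num) hn
    exact absurd this (by decide)
  unfold PySem.Int.toChars at h
  by_cases hc : c < 0
  · rw [if_pos hc] at h
    rcases List.mem_cons.mp h with h | h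
    · exact absurd h (by decide)
    · exact hd _ h
  · rw [if_neg hc] at h
    exact hd _ h

theorem pvBen_def (token : List Char) (c : Int) :
    pvBen token c = if token == pvTok2 then '(' :: pvRing c ++ [')'] else pvRing c := rfl

theorem pvRing_no_bracket (c : Int) : '[' ∉ pvRing c := by
  
  intro h
  have hm := pvNoBracket_toChars c
  simp [pvRing, hm] at h

theorem pvBen_eq_ring (c : Int) : pvBen pvTok1 c = pvRing c ∧ pvBen pvTok2 c = '(' :: pvRing c ++ [')'] := by
  
  constructor
  · rw [pvBen_def, if_neg (by decide)]
  · rw [pvBen_def, if_pos (by decide)]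

theorem pvTok2_not_infix_ring (token : List Char) (c : Int) : ¬ pvTok2 <:+: pvBen token c := by
  
  intro hinf
  have hmem : '[' ∈ pvBen token c := hinf.subset (by simp [pvTok2])
  have hr := pvRing_no_bracket c
  rw [pvBen_def] at hmem
  split at hmem
  · simp [hr] at hmem
  · exact hr hmem

-- occurrences of the two tokens never share a position
theorem pvTok_not_both (x : List Char) : ¬ (pvTok1 <+: x ∧ pvTok2 <+: x) := by
  
  rintro ⟨⟨u, rfl⟩, ⟨v, hv⟩⟩
  simp [pvTok1, pvTok2] at hv

-- no [C6H6] occurrence starts strictly inside a [Bran_C6H6] occurrence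
theorem pvTok1_not_inside (s : List Char) (p2 j : Nat) (h2 : pvTok2 <+: s.drop p2)
    (hlt : p2 < j) (hlt2 : j < p2 + 11) : ¬ pvTok1 <+: s.drop j := by
  
  intro h1
  obtain ⟨t, ht⟩ := h2
  obtain ⟨w, hw⟩ := h1
  obtain ⟨m, rfl⟩ : ∃ m, j = p2 + m := ⟨j - p2, by omega⟩
  have hmb : 1 ≤ m ∧ m ≤ 10 := by omega
  have hdj : List.drop (p2 + m) s = List.drop m pvTok2 ++ t := by
    have h1 : List.drop (p2 + m) s = List.drop m (List.drop p2 s) := by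
      rw [List.drop_drop]
    rw [h1, ← ht, List.drop_append_of_le_length (by simp [pvTok2]; omega)]
  rw [hdj] at hw
  obtain ⟨hm1, hm10⟩ := hmb
  interval_cases m <;> simp [pvTok1, pvTok2] at hw

-- occurrence in a prefix is an occurrence in the whole
theorem pvOcc_of_prefix (x s sub : List Char) (hx : x <+: s) (i : Nat)
    (h : sub <+: x.drop i) : sub <+: s.drop i := by
  
  exact h.trans (hx.drop i)

-- splitOn with a skipped occurrence-free prefix
theorem pvSplitOn_shift (s sep : List Char) (hsep : sep ≠ []) (k : Nat) (hk : k ≤ s.length)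
    (hnone : ∀ i < k, ¬ sep <+: s.drop i) :
    PySem.Chars.splitOn s sep =
      List.modifyHead (s.take k ++ ·) (PySem.Chars.splitOn (s.drop k) sep) := by
  
  have hshift := pvFind_shift s sep k hk hnone
  by_cases h : PySem.Chars.find (s.drop k) sep = -1
  · rw [pvSplitOn_of_neg _ _ hsep (by rw [hshift, if_pos h]), pvSplitOn_of_neg _ _ hsep h]
    simp
  · have h0 : 0 ≤ PySem.Chars.find (s.drop k) sep := by
      have := PySem.Chars.neg_one_le_find (s.drop k) sep; omega
    have hf : PySem.Chars.find s sep = k + PySem.Chars.find (s.drop k) sep := by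
      rw [hshift, if_neg h]
    have h0' : 0 ≤ PySem.Chars.find s sep := by omega
    rw [pvSplitOn_of_nonneg _ _ hsep h0', pvSplitOn_of_nonneg _ _ hsep h0]
    simp only [List.modifyHead_cons]
    have hq : (PySem.Chars.find s sep).toNat = k + (PySem.Chars.find (s.drop k) sep).toNat := by
      omega
    rw [hq]
    congr 1
    · rw [List.take_add]
    · rw [List.drop_drop]
      congr 2
      omega

-- ---- clean forms of A's loops ----

def pvIlv (mk : Int → List Char) : List (List Char) → Int → (List (List Char) × Int)
  | [], c => ([], c)
  | [q], c => ([q], c)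
  | q :: q' :: rest, c =>
    let r := pvIlv mk (q' :: rest) (c - 1)
    (q :: mk c :: r.1, r.2)

def pvPass (mk : Int → List Char) (sep : List Char) : List (List Char) → Int → (List (List Char) × Int)
  | [], c => ([], c)
  | q :: rest, c =>
    let i := pvIlv mk (PySem.Chars.splitOn q sep) c
    let r := pvPass mk sep rest i.2
    (i.1 ++ r.1, r.2)

theorem pvIlv_counter (mk : Int → List Char) :
    ∀ l c, l ≠ [] → (pvIlv mk l c).2 = c - l.length + 1 := by
  
  intro l
  induction l with
  | nil => simp
  | cons q rest ih =>
    intro c _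
    cases rest with
    | nil => simp [pvIlv]
    | cons q' rest' =>
      simp only [pvIlv]
      rw [ih (c - 1) (by simp)]
      simp only [List.length_cons]
      push_cast
      omega

theorem pvIlv_modifyHead (mk : Int → List Char) (g : List Char → List Char) :
    ∀ l c, pvIlv mk (List.modifyHead g l) c = ((pvIlv mk l c).1.modifyHead g, (pvIlv mk l c).2) := by
  
  intro l c
  cases l with
  | nil => simp [pvIlv]
  | cons q rest =>
    cases rest with
    | nil => simp [pvIlv]
    | cons q' rest' => simp [pvIlv]

-- the enumerate fold of A is pvIlv
theorem pvEnumFold (mk : Int → List Char) (full : Int) :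
    ∀ (l : List (List Char)) (k : Int) (acc : List (List Char)) (c : Int),
      k + l.length = full →
      (PySem.List.enumerate l k).foldl (fun (a : List (List Char) × Int) p =>
          let a1 : List (List Char) × Int := (a.1 ++ [p.2], a.2)
          if p.1 < full - 1 then (a1.1 ++ [mk a1.2], a1.2 - 1) else a1) (acc, c)
        = (acc ++ (pvIlv mk l c).1, (pvIlv mk l c).2) := by
  
  intro l
  induction l with
  | nil =>
    intro k acc c h
    simp [PySem.List.enumerate, pvIlv]
  | cons x t ih =>
    intro k acc c h
    cases t with
    | nil =>
      rw [PySem.List.enumerate]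
      simp only [List.foldl_cons, List.foldl_nil]
      rw [PySem.List.enumerate]
      simp only [List.foldl_nil]
      have hcond : ¬ (k < full - 1) := by
        simp at h; omega
      simp [hcond, pvIlv]
    | cons y t' =>
      rw [PySem.List.enumerate]
      simp only [List.foldl_cons]
      have hcond : k < full - 1 := by
        simp at h
        push_cast at h ⊢
        omega
      simp only [hcond, if_pos]
      rw [ih (k + 1) (acc ++ [x] ++ [mk c]) (c - 1) (by simp at h ⊢; push_cast at h ⊢; omega)]
      simp only [pvIlv]
      simp

-- the middle fold of A is pvPass
theorem pvMidFold (token : List Char) :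
    ∀ (ms : List (List Char)) (acc : List (List Char)) (c : Int),
      ms.foldl (fun (acc : List (List Char) × Int) modify_smi =>
        let strings := PySem.Chars.splitOn modify_smi token
        let strings_len : Int := strings.length
        let inner := (PySem.List.enumerate strings).foldl (fun (a : List (List Char) × Int) p =>
          let a1 : List (List Char) × Int := (a.1 ++ [p.2], a.2)
          if p.1 < strings_len - 1 then (a1.1 ++ [pvBen token a1.2], a1.2 - 1) else a1)
          ([], acc.2)
        (acc.1 ++ inner.1, inner.2)) (acc, c)
      = (acc ++ (pvPass (pvBen token) token ms c).1, (pvPass (pvBen token) token ms c).2) := by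
  
  intro ms
  induction ms with
  | nil =>
    intro acc c
    simp [pvPass]
  | cons q rest ih =>
    intro acc c
    simp only [List.foldl_cons]
    rw [pvEnumFold (pvBen token) ((PySem.Chars.splitOn q token).length : Int)
      (PySem.Chars.splitOn q token) 0 [] c (by simp)]
    rw [ih]
    simp only [pvPass, List.nil_append]
    simp [List.append_assoc]

-- the enumerate fold with the port's let-bindings inlined (definitionally equal)
theorem pvEnumFold' (token : List Char) (q : List Char) (acc : List (List Char)) (c : Int) :
    List.foldl (fun (a : List (List Char) × Int) (p : Int × List Char) =>
        if p.1 < ((PySem.Chars.splitOn q token).length : Int) - 1 then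
          (a.1 ++ [p.2] ++ [pvBen token a.2], a.2 - 1)
        else (a.1 ++ [p.2], a.2))
      (acc, c) (PySem.List.enumerate (PySem.Chars.splitOn q token))
    = (acc ++ (pvIlv (pvBen token) (PySem.Chars.splitOn q token) c).1,
       (pvIlv (pvBen token) (PySem.Chars.splitOn q token) c).2) :=
  pvEnumFold (pvBen token) ((PySem.Chars.splitOn q token).length : Int)
    (PySem.Chars.splitOn q token) 0 acc c (by simp)

-- the same statement as pvMidFold with the port's let-bindings inlined (definitionally equal)
theorem pvMidFold' (token : List Char) :
    ∀ (ms : List (List Char)) (acc : List (List Char)) (c : Int),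
      List.foldl (fun (acc : List (List Char) × Int) modify_smi =>
          (acc.1 ++ (List.foldl (fun (a : List (List Char) × Int) (p : Int × List Char) =>
              if p.1 < ((PySem.Chars.splitOn modify_smi token).length : Int) - 1 then
                (a.1 ++ [p.2] ++ [pvBen token a.2], a.2 - 1)
              else (a.1 ++ [p.2], a.2))
            ([], acc.2) (PySem.List.enumerate (PySem.Chars.splitOn modify_smi token))).1,
           (List.foldl (fun (a : List (List Char) × Int) (p : Int × List Char) =>
              if p.1 < ((PySem.Chars.splitOn modify_smi token).length : Int) - 1 then
                (a.1 ++ [p.2] ++ [pvBen token a.2], a.2 - 1)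
              else (a.1 ++ [p.2], a.2))
            ([], acc.2) (PySem.List.enumerate (PySem.Chars.splitOn modify_smi token))).2))
        (acc, c) ms
      = (acc ++ (pvPass (pvBen token) token ms c).1, (pvPass (pvBen token) token ms c).2) :=
  pvMidFold token

-- ---- removing blanks is invisible to the result ----

theorem pvRemoveBlanks_eq_filter (l : List (List Char)) :
    pvRemoveBlanks l = l.filter (· ≠ []) := by
  
  induction l using pvRemoveBlanks.induct with
  | case1 l h ih =>
    rw [pvRemoveBlanks, dif_pos h, ih]
    -- filtering after erasing a blank is filtering
    clear ih h
    induction l with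
    | nil => rfl
    | cons a t iht =>
      rcases eq_or_ne a [] with rfl | ha
      · simp
      · have hbeq : (a == ([] : List Char)) = false := by simpa using ha
        rw [List.erase_cons, hbeq]
        simp only [Bool.false_eq_true, if_false, List.filter_cons, iht]
  | case2 l h =>
    rw [pvRemoveBlanks, dif_neg h]
    symm
    apply List.filter_eq_self.mpr
    intro x hx
    simp only [ne_eq, decide_eq_true_eq]
    intro hxe
    exact h (hxe ▸ hx)

theorem pvFlatten_filter (l : List (List Char)) :
    (l.filter (· ≠ [])).flatten = l.flatten := by
  
  induction l with
  | nil => rfl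
  | cons q t ih =>
    simp only [ne_eq, decide_not] at ih ⊢
    rcases eq_or_ne q [] with rfl | hq
    · simpa using ih
    · simp only [List.filter_cons, decide_eq_true_eq]
      rw [if_pos (by simpa using hq)]
      simp [ih]

theorem pvPass_filter (mk : Int → List Char) (sep : List Char) (hsep : sep ≠ []) :
    ∀ l c, ((pvPass mk sep (l.filter (· ≠ [])) c).1.flatten = (pvPass mk sep l c).1.flatten)
        ∧ ((pvPass mk sep (l.filter (· ≠ [])) c).2 = (pvPass mk sep l c).2) := by
  
  intro l
  induction l with
  | nil => simp
  | cons q rest ih =>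
    intro c
    simp only [ne_eq, decide_not] at ih ⊢
    rcases eq_or_ne q [] with rfl | hq
    · have hsp : PySem.Chars.splitOn [] sep = [[]] :=
        pvSplitOn_of_neg [] sep hsep (pvFind_nil sep hsep)
      simp only [List.filter_cons, decide_eq_true_eq]
      rw [if_neg (by simp)]
      simp only [pvPass, hsp, pvIlv]
      constructor
      · rw [(ih c).1]
        simp
      · exact (ih c).2
    · simp only [List.filter_cons, decide_eq_true_eq]
      rw [if_pos (by simpa using hq)]
      simp only [pvPass]
      constructor
      · simp only [List.flatten_append]
        rw [(ih _).1]
      · rw [(ih _).2]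

theorem pvJoin_nil (l : List (List Char)) : PySem.Chars.join [] l = l.flatten := by
  
  show List.intercalate [] l = _
  induction l with
  | nil => rfl
  | cons a t ih =>
    cases t with
    | nil => simp [List.intercalate]
    | cons b t' =>
      simp only [List.intercalate] at ih ⊢
      simp only [List.intersperse_cons₂]
      simp only [List.flatten_cons]
      simp [ih]

-- pass 2 walks over a token-free piece unchanged
theorem pvPass2_clean (q : List Char) (L : List (List Char)) (c2 : Int)
    (hq : ¬ pvTok2 <:+: q) :
    pvPass (pvBen pvTok2) pvTok2 (q :: L) c2 =
      (q :: (pvPass (pvBen pvTok2) pvTok2 L c2).1, (pvPass (pvBen pvTok2) pvTok2 L c2).2) := by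
  have hsp : PySem.Chars.splitOn q pvTok2 = [q] :=
    pvSplitOn_of_neg q pvTok2 (by decide) ((PySem.Chars.find_eq_neg_one_iff q pvTok2).mpr hq)
  simp [pvPass, hsp, pvIlv]

theorem pvSplitOn_head_prefix (l sep : List Char) (hsep : sep ≠ []) (q : List Char)
    (L : List (List Char)) (h : PySem.Chars.splitOn l sep = q :: L) : q <+: l := by
  by_cases hf : PySem.Chars.find l sep = -1
  · rw [pvSplitOn_of_neg l sep hsep hf] at h
    simp only [List.cons.injEq] at h
    exact h.1 ▸ List.prefix_refl l
  · have h0 : 0 ≤ PySem.Chars.find l sep := by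
      have := PySem.Chars.neg_one_le_find l sep; omega
    rw [pvSplitOn_of_nonneg l sep hsep h0] at h
    simp only [List.cons.injEq] at h
    exact h.1 ▸ List.take_prefix _ l

theorem pvIlv_head (mk : Int → List Char) (q : List Char) (L : List (List Char)) (c : Int) :
    ∃ T, (pvIlv mk (q :: L) c).1 = q :: T := by
  cases L with
  | nil => exact ⟨[], rfl⟩
  | cons q' L' => exact ⟨mk c :: (pvIlv mk (q' :: L') (c - 1)).1, rfl⟩

theorem pvIlv_cons (mk : Int → List Char) (q : List Char) (L : List (List Char)) (c : Int)
    (h : L ≠ []) :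
    pvIlv mk (q :: L) c = (q :: mk c :: (pvIlv mk L (c - 1)).1, (pvIlv mk L (c - 1)).2) := by
  cases L with
  | nil => exact absurd rfl h
  | cons q' L' => rfl

theorem pvPass_singleton (mk : Int → List Char) (sep : List Char) (q : List Char) (c : Int) :
    pvPass mk sep [q] c = pvIlv mk (PySem.Chars.splitOn q sep) c := by
  simp [pvPass]

-- ---- the main induction: A's two passes are B's single scan ----

theorem pvMain : ∀ n (s : List Char) (c1 c2 : Int), s.length ≤ n →
    ((pvPass (pvBen pvTok2) pvTok2 ((pvPass (pvBen pvTok1) pvTok1 [s] c1).1) c2).1).flatten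
      = pvGo s c1 c2 := by
  intro n
  induction n with
  | zero =>
    intro s c1 c2 h
    have hs : s = [] := by cases s <;> simp_all
    subst hs
    rw [pvGo]
    have hsp1 : PySem.Chars.splitOn [] pvTok1 = [[]] :=
      pvSplitOn_of_neg [] pvTok1 (by decide) (pvFind_nil pvTok1 (by decide))
    have hsp2 : PySem.Chars.splitOn [] pvTok2 = [[]] :=
      pvSplitOn_of_neg [] pvTok2 (by decide) (pvFind_nil pvTok2 (by decide))
    simp [pvPass, pvIlv, hsp1, hsp2, pvFind_nil pvTok1 (by decide), pvFind_nil pvTok2 (by decide)]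
  | succ n ih =>
    intro s c1 c2 hlen
    have hm1 := PySem.Chars.neg_one_le_find s pvTok1
    have hm2 := PySem.Chars.neg_one_le_find s pvTok2
    by_cases hb : PySem.Chars.find s pvTok1 = -1 ∧ PySem.Chars.find s pvTok2 = -1
    · have hsp1 : PySem.Chars.splitOn s pvTok1 = [s] :=
        pvSplitOn_of_neg s pvTok1 (by decide) hb.1
      have hsp2 : PySem.Chars.splitOn s pvTok2 = [s] :=
        pvSplitOn_of_neg s pvTok2 (by decide) hb.2
      rw [pvGo]
      simp only [hb.1, hb.2, and_self, if_pos]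
      rw [pvPass_singleton, hsp1]
      simp only [pvIlv]
      rw [pvPass_singleton, hsp2]
      simp [pvIlv]
    · by_cases hbr : PySem.Chars.find s pvTok2 = -1 ∨
          (¬ PySem.Chars.find s pvTok1 = -1 ∧ PySem.Chars.find s pvTok1 < PySem.Chars.find s pvTok2)
      -- [C6H6] comes first
      · have hp1 : 0 ≤ PySem.Chars.find s pvTok1 := by
          rcases hbr with h | h
          · rcases not_and_or.mp hb with h1 | h1
            · omega
            · exact absurd h h1
          · omega
        set p1 : Nat := (PySem.Chars.find s pvTok1).toNat with hp1def
        have hocc1 : pvTok1 <+: s.drop p1 := (PySem.Chars.find_spec hp1).1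
        have hmin1 := (PySem.Chars.find_spec hp1).2
        have hlen1 : p1 + 6 ≤ s.length := by
          have := pvFind_occ_len s pvTok1 hp1
          simpa using this
        have hsp1 : PySem.Chars.splitOn s pvTok1 =
            s.take p1 :: PySem.Chars.splitOn (s.drop (p1 + 6)) pvTok1 := by
          have := pvSplitOn_of_nonneg s pvTok1 (by decide) hp1
          simpa using this
        -- the head piece of pass 1 contains no [Bran_C6H6]
        have hnota : ¬ pvTok2 <:+: s.take p1 := by
          intro hinf
          obtain ⟨j, hj⟩ := (pvInfix_iff_occ' pvTok2 (s.take p1)).mp hinf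
          have hjlt : j < p1 := by
            by_contra hge
            rw [List.drop_eq_nil_of_le (by simp; omega)] at hj
            have := hj.length_le
            simp [pvTok2] at this
          have hjs : pvTok2 <+: s.drop j := pvOcc_of_prefix _ s _ (List.take_prefix p1 s) j hj
          rcases hbr with h | h
          · exact (PySem.Chars.find_eq_neg_one_iff s pvTok2).mp h
              ((pvInfix_iff_occ' pvTok2 s).mpr ⟨j, hjs⟩)
          · have hp2 : 0 ≤ PySem.Chars.find s pvTok2 := by omega
            exact (PySem.Chars.find_spec hp2).2 j (by omega) hjs
        -- evaluate both sides
        rw [pvGo, if_neg hb, if_pos hbr, ← hp1def]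
        have hpass1 : (pvPass (pvBen pvTok1) pvTok1 [s] c1).1
            = s.take p1 :: pvBen pvTok1 c1 ::
              (pvIlv (pvBen pvTok1) (PySem.Chars.splitOn (s.drop (p1 + 6)) pvTok1) (c1 - 1)).1 := by
          rw [pvPass_singleton, hsp1,
            pvIlv_cons _ _ _ _ (pvSplitOn_ne_nil (s.drop (p1 + 6)) pvTok1 (by decide))]
        rw [hpass1, pvPass2_clean _ _ c2 hnota,
          pvPass2_clean _ _ c2 (pvTok2_not_infix_ring pvTok1 c1)]
        have hihres := ih (s.drop (p1 + 6)) (c1 - 1) c2 (by simp; omega)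
        rw [pvPass_singleton] at hihres
        rw [(pvBen_eq_ring c1).1]
        simp only [List.flatten_cons]
        rw [hihres]
        simp [List.append_assoc]
      -- [Bran_C6H6] comes first
      · have hp2 : 0 ≤ PySem.Chars.find s pvTok2 := by
          rcases not_or.mp hbr with ⟨h2, -⟩
          omega
        obtain ⟨hne2, hno⟩ := not_or.mp hbr
        set p2 : Nat := (PySem.Chars.find s pvTok2).toNat with hp2def
        have hocc2 : pvTok2 <+: s.drop p2 := (PySem.Chars.find_spec hp2).1
        have hmin2 := (PySem.Chars.find_spec hp2).2
        have hlen2 : p2 + 11 ≤ s.length := by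
          have := pvFind_occ_len s pvTok2 hp2
          simpa [pvTok2] using this
        -- no [C6H6] occurrence starts before p2 + 11
        have hnone1 : ∀ i < p2 + 11, ¬ pvTok1 <+: s.drop i := by
          intro i hi hpi
          rcases Nat.lt_trichotomy i p2 with hc | hc | hc
          · by_cases h1 : PySem.Chars.find s pvTok1 = -1
            · exact pvNo_occ_of_find_eq_neg_one s pvTok1 h1 i hpi
            · have hp1 : 0 ≤ PySem.Chars.find s pvTok1 := by omega
              have hle : PySem.Chars.find s pvTok2 ≤ PySem.Chars.find s pvTok1 := by
                rcases not_and_or.mp hno with h | h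
                · exact absurd h1 (by simpa using h)
                · omega
              exact (PySem.Chars.find_spec hp1).2 i (by omega) hpi
          · rw [hc] at hpi
            exact pvTok_not_both (s.drop p2) ⟨hpi, hocc2⟩
          · exact pvTok1_not_inside s p2 i hocc2 hc hi hpi
        set a := s.take p2 with ha
        have halen : a.length = p2 := by simp [ha]; omega
        have htk : s.take (p2 + 11) = a ++ pvTok2 := by
          have h1 : s.take (p2 + 11) = a ++ (s.drop p2).take 11 := List.take_add
          obtain ⟨t, ht⟩ := hocc2
          rw [h1, ← ht, List.take_left' (by decide)]
        have hshift := pvSplitOn_shift s pvTok1 (by decide) (p2 + 11) hlen2 hnone1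
        rw [htk] at hshift
        obtain ⟨q0, L0, hq0⟩ := List.exists_cons_of_ne_nil
          (pvSplitOn_ne_nil (s.drop (p2 + 11)) pvTok1 (by decide))
        have hq0pre : q0 <+: s.drop (p2 + 11) :=
          pvSplitOn_head_prefix _ pvTok1 (by decide) q0 L0 hq0
        obtain ⟨T, hT⟩ := pvIlv_head (pvBen pvTok1) q0 L0 c1
        have hsfull : s = (a ++ pvTok2) ++ s.drop (p2 + 11) := by
          rw [← htk, List.take_append_drop]
        have hpieceprefix : (a ++ pvTok2) ++ q0 <+: s := by
          obtain ⟨t, ht⟩ := hq0pre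
          calc (a ++ pvTok2) ++ q0 <+: ((a ++ pvTok2) ++ q0) ++ t := List.prefix_append _ t
          _ = s := by rw [List.append_assoc (a ++ pvTok2) q0 t, ht, ← hsfull]
        have hfpiece : PySem.Chars.find ((a ++ pvTok2) ++ q0) pvTok2 = (p2 : Int) := by
          refine pvFind_eq_of _ _ p2 ?_ ?_
          · rw [List.append_assoc, ← halen, List.drop_left]
            exact List.prefix_append pvTok2 q0
          · intro i hi hpi
            exact hmin2 i (by omega) (pvOcc_of_prefix _ s _ hpieceprefix i hpi)
        have hsplitpiece : PySem.Chars.splitOn ((a ++ pvTok2) ++ q0) pvTok2 =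
            a :: PySem.Chars.splitOn q0 pvTok2 := by
          rw [pvSplitOn_of_nonneg _ pvTok2 (by decide) (by rw [hfpiece]; omega)]
          rw [hfpiece]
          congr 1
          · rw [Int.toNat_natCast, List.append_assoc, ← halen, List.take_left]
          · congr 1
            rw [Int.toNat_natCast]
            rw [show p2 + pvTok2.length = ((a ++ pvTok2).length) by simp [halen], List.drop_left]
        -- evaluate both sides
        rw [pvGo, if_neg hb, if_neg hbr, ← hp2def]
        have hpass1 : (pvPass (pvBen pvTok1) pvTok1 [s] c1).1 = ((a ++ pvTok2) ++ q0) :: T := by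
          rw [pvPass_singleton, hshift, hq0]
          rw [pvIlv_modifyHead (pvBen pvTok1) ((a ++ pvTok2) ++ ·) (q0 :: L0) c1]
          simp only [hT, List.modifyHead_cons]
        rw [hpass1]
        have hihres := ih (s.drop (p2 + 11)) c1 (c2 - 1) (by simp; omega)
        have hp1r : (pvPass (pvBen pvTok1) pvTok1 [s.drop (p2 + 11)] c1).1 = q0 :: T := by
          rw [pvPass_singleton, hq0, hT]
        rw [hp1r] at hihres
        simp only [pvPass, hsplitpiece,
          pvIlv_cons _ _ _ _ (pvSplitOn_ne_nil q0 pvTok2 (by decide))] at hihres ⊢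
        rw [(pvBen_eq_ring c2).2]
        simp only [List.flatten_cons, List.flatten_append] at hihres ⊢
        rw [← hihres]
        simp only [List.append_assoc]
        rw [ha]

-- ===== VERDICT (by name: the statement is the Claim_ definition above) =====
theorem inverse_modify_smiles_spec : Claim_equal_inverse_modify_smiles := by
  intro m _
  unfold Spec_inverse_modify_smiles inverse_modify_smiles inverse_modify_smiles_alt
  simp only [List.foldl_cons, List.foldl_nil]
  refine congrArg String.ofList ?_
  have hst : (pvPass (pvBen pvTok1) pvTok1 [m.toList] 99).2
      = 99 - (PySem.Chars.count m.toList pvTok1 : Int) := by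
    rw [pvPass_singleton]
    rw [pvIlv_counter _ _ _ (pvSplitOn_ne_nil m.toList pvTok1 (by decide))]
    have hc := pvCount_eq m.toList pvTok1 (by decide)
    have hcast : ((PySem.Chars.splitOn m.toList pvTok1).length : Int)
        = (PySem.Chars.count m.toList pvTok1 : Int) + 1 := by
      exact_mod_cast congrArg (Nat.cast (R := Int)) hc.symm
    omega
  rw [pvEnumFold' pvTok1 m.toList [] 99]
  simp only [List.nil_append]
  rw [pvMidFold' pvTok2 _ [] _]
  simp only [List.nil_append]
  simp only [pvRemoveBlanks_eq_filter]
  rw [pvJoin_nil, pvFlatten_filter]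
  rw [(pvPass_filter (pvBen pvTok2) pvTok2 (by decide) _ _).1]
  rw [show (pvIlv (pvBen pvTok1) (PySem.Chars.splitOn m.toList pvTok1) 99).1
      = (pvPass (pvBen pvTok1) pvTok1 [m.toList] 99).1 from by rw [pvPass_singleton]]
  rw [show (pvIlv (pvBen pvTok1) (PySem.Chars.splitOn m.toList pvTok1) 99).2
      = (pvPass (pvBen pvTok1) pvTok1 [m.toList] 99).2 from by rw [pvPass_singleton]]
  rw [pvMain (m.toList.length) (m.toList) 99 _ le_rfl]
  rw [hst]
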